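-- pv_equiv track=rewrite | github.com/recski/tuw-nlp | tuw_nlp/sem/hrg/evaluate.py | add_ids
-- ===== SOURCE A (Python) =====
-- def add_ids(bolinas_str):
--     graph_with_ids = ""
--     next_id = 1
--     for i, c in enumerate(bolinas_str):
--         if c == '.':
--             if bolinas_str[i-1] == ' ':
--                 graph_with_ids += f"(n{next_id})"
--             else:
--                 graph_with_ids += f"n{next_id}"
--             next_id += 1
--         else:
--             graph_with_ids += c
--     return graph_with_ids
-- ===== SOURCE B (Python) =====
-- def add_ids(bolinas_str):
--     dot_positions = [i for i, c in enumerate(bolinas_str) if c == '.']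
--     parts = []
--     prev = 0
--     for next_id, pos in enumerate(dot_positions, start=1):
--         parts.append(bolinas_str[prev:pos])
--         token = f"n{next_id}"
--         if bolinas_str[pos - 1] == ' ':
--             token = f"({token})"
--         parts.append(token)
--         prev = pos + 1
--     parts.append(bolinas_str[prev:])
--     return ''.join(parts)
-- ===== Notes on version B (the rewrite author's own statement) =====
-- stated objective: alternative
-- what changed: Replaces A's single char-by-char scan that appends to the result string per character with a two-pass decomposition: first collect the list of dot positions, then assemble the result from whole slices between dots plus the generated id tokens and join them.
import Mathlib
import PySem

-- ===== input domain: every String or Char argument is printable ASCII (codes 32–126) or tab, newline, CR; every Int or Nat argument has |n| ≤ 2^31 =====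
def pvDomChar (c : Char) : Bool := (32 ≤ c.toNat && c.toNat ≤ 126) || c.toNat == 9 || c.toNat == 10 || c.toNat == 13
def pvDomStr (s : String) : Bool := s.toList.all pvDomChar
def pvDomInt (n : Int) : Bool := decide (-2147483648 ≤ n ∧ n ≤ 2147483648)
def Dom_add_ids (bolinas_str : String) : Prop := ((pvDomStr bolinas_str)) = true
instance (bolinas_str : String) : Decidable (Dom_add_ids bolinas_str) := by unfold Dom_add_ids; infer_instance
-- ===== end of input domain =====

-- B replaces A's char-by-char scan by a two-pass decomposition (collect dot positions, then
-- assemble slices and tokens); alternative structure, same cost; return values proved equal.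

-- ===== PORT A =====
-- literal port of A: one foldl over enumerate(s), state = (accumulated chars, next_id)
def add_ids (bolinas_str : String) : String :=
  let cs := bolinas_str.toList
  let st := (PySem.List.enumerate cs 0).foldl
    (fun (st : List Char × Int) (ic : Int × Char) =>
      if ic.2 = '.' then
        (st.1 ++ (if PySem.List.pyGet? cs (ic.1 - 1) = some ' '
                  then ('(' :: 'n' :: PySem.Int.toChars st.2) ++ [')']
                  else 'n' :: PySem.Int.toChars st.2), st.2 + 1)
      else (st.1 ++ [ic.2], st.2)) ([], 1)
  String.ofList st.1

-- ===== PORT B =====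
-- literal port of B: dot positions first, then assemble parts (slices + tokens), join = flatten
def add_ids_alt (bolinas_str : String) : String :=
  let cs := bolinas_str.toList
  let dotPositions := ((PySem.List.enumerate cs 0).filter (fun ic => ic.2 == '.')).map (·.1)
  let st := (PySem.List.enumerate dotPositions 1).foldl
    (fun (st : List (List Char) × Int) (kp : Int × Int) =>
      let token := 'n' :: PySem.Int.toChars kp.1
      let token := if PySem.List.pyGet? cs (kp.2 - 1) = some ' '
                   then ('(' :: token) ++ [')'] else token
      (st.1 ++ [PySem.List.slice cs (some st.2) (some kp.2), token], kp.2 + 1))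
    ([], 0)
  String.ofList (st.1 ++ [PySem.List.slice cs (some st.2) none]).flatten

-- ===== PRECONDITION & SPEC =====
def Spec_add_ids (bolinas_str : String) (out : String) : Prop := out = add_ids_alt bolinas_str
instance (bolinas_str : String) (out : String) : Decidable (Spec_add_ids bolinas_str out) := by unfold Spec_add_ids; infer_instance

-- ===== CLAIM (what is proved, stated in full; the proofs are below) =====
def Claim_equal_add_ids : Prop := ∀ (bolinas_str : String), Dom_add_ids bolinas_str → Spec_add_ids bolinas_str (add_ids bolinas_str)

-- ===== LEMMAS AND PROOFS =====

-- the token emitted for a dot at absolute index i with id nid (lookback into the full string)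
def pvTok (cs : List Char) (i nid : Int) : List Char :=
  if PySem.List.pyGet? cs (i - 1) = some ' '
  then ('(' :: 'n' :: PySem.Int.toChars nid) ++ [')']
  else 'n' :: PySem.Int.toChars nid

-- common recursive specification: process `rest = cs.drop j` with next id `nid`
def pvSpecGo (cs : List Char) : List Char → Nat → Int → List Char
  | [], _, _ => []
  | c :: r, j, nid =>
      if c = '.' then pvTok cs j nid ++ pvSpecGo cs r (j+1) (nid+1)
      else c :: pvSpecGo cs r (j+1) nid

-- B's assembly as a recursion over the dot-position list
def pvBGo (cs : List Char) : List Int → Int → Int → List Char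
  | [], _, prev => PySem.List.slice cs (some prev) none
  | pos :: ps, k, prev =>
      PySem.List.slice cs (some prev) (some pos) ++ pvTok cs pos k ++ pvBGo cs ps (k+1) (pos+1)

theorem pvA_loop (cs : List Char) (rest : List Char) :
    ∀ (j : Nat) (acc : List Char) (nid : Int),
    ((PySem.List.enumerate rest (j : Int)).foldl
      (fun (st : List Char × Int) (ic : Int × Char) =>
        if ic.2 = '.' then
          (st.1 ++ (if PySem.List.pyGet? cs (ic.1 - 1) = some ' '
                    then ('(' :: 'n' :: PySem.Int.toChars st.2) ++ [')']
                    else 'n' :: PySem.Int.toChars st.2), st.2 + 1)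
        else (st.1 ++ [ic.2], st.2)) (acc, nid)).1
    = acc ++ pvSpecGo cs rest j nid := by
  induction rest with
  | nil => intro j acc nid; simp [PySem.List.enumerate_nil, pvSpecGo]
  | cons c r ih =>
    intro j acc nid
    rw [PySem.List.enumerate_cons]
    by_cases hc : c = '.'
    · have : ((j : Int) + 1) = ((j + 1 : Nat) : Int) := by push_cast; ring
      simp only [List.foldl_cons, hc, this, pvSpecGo]
      rw [ih (j+1)]
      simp [pvTok, List.append_assoc]
    · have : ((j : Int) + 1) = ((j + 1 : Nat) : Int) := by push_cast; ring
      simp only [List.foldl_cons, if_neg hc, this, pvSpecGo]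
      rw [ih (j+1)]
      simp

theorem pvB_loop (cs : List Char) (ps : List Int) :
    ∀ (k : Int) (parts : List (List Char)) (prev : Int),
    (((PySem.List.enumerate ps k).foldl
      (fun (st : List (List Char) × Int) (kp : Int × Int) =>
        (st.1 ++ [PySem.List.slice cs (some st.2) (some kp.2),
                  if PySem.List.pyGet? cs (kp.2 - 1) = some ' '
                  then ('(' :: 'n' :: PySem.Int.toChars kp.1) ++ [')']
                  else 'n' :: PySem.Int.toChars kp.1], kp.2 + 1))
      (parts, prev)).1
      ++ [PySem.List.slice cs
            (some ((PySem.List.enumerate ps k).foldl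
              (fun (st : List (List Char) × Int) (kp : Int × Int) =>
                (st.1 ++ [PySem.List.slice cs (some st.2) (some kp.2),
                          if PySem.List.pyGet? cs (kp.2 - 1) = some ' '
                          then ('(' :: 'n' :: PySem.Int.toChars kp.1) ++ [')']
                          else 'n' :: PySem.Int.toChars kp.1], kp.2 + 1))
              (parts, prev)).2) none]).flatten
    = parts.flatten ++ pvBGo cs ps k prev := by
  induction ps with
  | nil => intro k parts prev; simp [PySem.List.enumerate_nil, pvBGo]
  | cons pos ps ih =>
    intro k parts prev
    rw [PySem.List.enumerate_cons]
    simp only [List.foldl_cons]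
    rw [ih]
    simp [pvBGo, pvTok, List.append_assoc]

theorem pvBGo_spec (cs : List Char) (rest : List Char) :
    ∀ (j : Nat) (nid : Int), rest = cs.drop j →
    pvBGo cs (((PySem.List.enumerate rest (j : Int)).filter (fun ic => ic.2 == '.')).map (·.1)) nid j
    = pvSpecGo cs rest j nid := by
  induction rest with
  | nil =>
    intro j nid hj
    simp only [PySem.List.enumerate_nil, List.filter_nil, List.map_nil, pvBGo, pvSpecGo]
    rw [PySem.List.slice_from_natCast, ← hj]
  | cons c r ih =>
    intro j nid hj
    have hcast : ((j : Int) + 1) = ((j + 1 : Nat) : Int) := by push_cast; ring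
    have hr : r = cs.drop (j + 1) := by
      have := congrArg List.tail hj
      simpa [List.tail_drop] using this
    have hdrop : cs.drop j = c :: cs.drop (j+1) := by rw [← hj, ← hr]
    rw [PySem.List.enumerate_cons]
    by_cases hc : c = '.'
    · simp only [List.filter_cons, hc, beq_self_eq_true, if_pos, List.map_cons, pvBGo,
        pvSpecGo, hcast]
      rw [ih (j+1) (nid+1) hr]
      have hslice : PySem.List.slice cs (some (j : Int)) (some (j : Int)) = [] := by
        rw [PySem.List.slice_natCast]; simp
      simp [hslice]
    · have hfilter : (c == '.') = false := by simp [hc]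
      simp only [List.filter_cons, hfilter, if_neg, Bool.false_eq_true, not_false_iff,
        pvSpecGo, if_neg hc, hcast]
      rw [← ih (j+1) nid hr]
      -- show pvBGo with prev = j prepends c compared to prev = j+1
      generalize hX : ((PySem.List.enumerate r ((j+1 : Nat) : Int)).filter
          (fun ic => ic.2 == '.')).map (·.1) = X at *
      cases X with
      | nil =>
        simp only [pvBGo]
        rw [PySem.List.slice_from_natCast, PySem.List.slice_from_natCast, hdrop]
      | cons pos ps =>
        have hpos : ∃ m : Nat, pos = ((j + 1 + m : Nat) : Int) := by
          have hmem : pos ∈ ((PySem.List.enumerate r ((j+1 : Nat) : Int)).filter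
              (fun ic => ic.2 == '.')).map (·.1) := by rw [hX]; exact List.mem_cons_self ..
          rcases List.mem_map.mp hmem with ⟨p, hp, hfst⟩
          rcases (PySem.List.mem_enumerate_iff _ _ _).mp (List.mem_of_mem_filter hp) with ⟨m, hm, hpeq⟩
          exact ⟨m, by rw [← hfst, hpeq]; push_cast; ring⟩
        rcases hpos with ⟨m, rfl⟩
        simp only [pvBGo]
        rw [PySem.List.slice_natCast, PySem.List.slice_natCast, hdrop]
        have h1 : j + 1 + m - j = m + 1 := by omega
        have h2 : j + 1 + m - (j + 1) = m := by omega
        rw [h1, h2]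
        simp

theorem pv_ports_eq (s : String) : add_ids s = add_ids_alt s := by
  simp only [add_ids, add_ids_alt]
  have hA := pvA_loop s.toList s.toList 0 [] 1
  have hB := pvB_loop s.toList
    (((PySem.List.enumerate s.toList 0).filter (fun ic => ic.2 == '.')).map (·.1)) 1 [] 0
  have hBG := pvBGo_spec s.toList s.toList 0 1 (by simp)
  simp only [Nat.cast_zero] at hA hBG
  rw [hA, hB, hBG]
  simp

-- ===== VERDICT (by name: the statement is the Claim_ definition above) =====
theorem add_ids_spec : Claim_equal_add_ids := by
  intro s _
  unfold Spec_add_ids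
  exact pv_ports_eq s
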